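-- pv_equiv track=rewrite | github.com/lleilin/advent-of-code-2024 | day-07/day7.py | part1_helper
-- ===== SOURCE A (Python) =====
-- def part1_helper(total, arr):
--         curr_set = set()
--         curr_set.add(arr[0])
--
--         for i in arr[1:]:
--             new_set = set()
--             for v in curr_set:
--                 new_set.add(v*i)
--                 new_set.add(v+i)
--             curr_set = new_set
--
--         return total in new_set
-- ===== SOURCE B (Python) =====
-- def part1_helper(total, arr):
--     def go(acc, rest):
--         if not rest:
--             return acc == total
--         return go(acc * rest[0], rest[1:]) or go(acc + rest[0], rest[1:])
--     return go(arr[0], arr[1:])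
-- ===== Notes on version B (the rewrite author's own statement) =====
-- stated objective: alternative
-- what changed: B replaces A's level-by-level reachable-value set (a new set rebuilt per element) with a depth-first recursion over the operator-choice tree carrying a single accumulator; no sets are built.
import Mathlib
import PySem

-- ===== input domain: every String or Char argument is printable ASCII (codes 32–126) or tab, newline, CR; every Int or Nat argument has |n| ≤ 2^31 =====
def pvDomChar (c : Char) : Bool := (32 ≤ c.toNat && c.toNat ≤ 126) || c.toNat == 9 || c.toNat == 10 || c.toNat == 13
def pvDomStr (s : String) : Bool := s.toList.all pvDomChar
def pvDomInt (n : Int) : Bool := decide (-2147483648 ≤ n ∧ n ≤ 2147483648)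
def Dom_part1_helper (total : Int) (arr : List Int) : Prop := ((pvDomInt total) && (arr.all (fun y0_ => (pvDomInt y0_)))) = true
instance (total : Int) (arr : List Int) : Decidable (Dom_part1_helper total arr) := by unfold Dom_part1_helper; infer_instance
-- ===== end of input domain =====

-- B replaces A's level-by-level set of reachable values by a depth-first recursion over the
-- operator-choice tree with one accumulator (objective: alternative, no speed claim).

-- ===== PORT A =====
-- inner 'for v in curr_set' loop: build new_set from curr_set (membership result is order-independent)
def pvStepA (s : PySem.Set Int) (i : Int) : PySem.Set Int :=
  s.foldl (fun ns v => PySem.Set.add (PySem.Set.add ns (v*i)) (v+i)) PySem.Set.empty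

def part1_helper (total : Int) (arr : List Int) : Bool :=
  match PySem.List.pyGet? arr 0 with
  | none => false  -- IndexError on empty arr, excluded by Pre_
  | some a0 =>
    let curr0 : PySem.Set Int := PySem.Set.add PySem.Set.empty a0
    -- the loop carries curr_set and the last new_set (none = never assigned → UnboundLocalError)
    let res := (PySem.List.slice arr (some 1) none).foldl
      (fun (st : PySem.Set Int × Option (PySem.Set Int)) i =>
        let ns := pvStepA st.1 i; (ns, some ns)) (curr0, none)
    match res.2 with
    | none => false  -- UnboundLocalError on single-element arr, excluded by Pre_
    | some ns => PySem.Set.contains ns total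

-- ===== PORT B =====
def pvGo (total acc : Int) (rest : List Int) : Bool :=
  match rest with
  | [] => acc == total
  | x :: xs => pvGo total (acc * x) xs || pvGo total (acc + x) xs

def part1_helper_alt (total : Int) (arr : List Int) : Bool :=
  match PySem.List.pyGet? arr 0 with
  | none => false  -- IndexError on empty arr
  | some a0 => pvGo total a0 (PySem.List.slice arr (some 1) none)

-- ===== PRECONDITION & SPEC =====
-- Pre_ excludes arr of length < 2: on [] A raises IndexError, on a singleton the loop never
-- runs and 'total in new_set' raises UnboundLocalError.
def Pre_part1_helper (total : Int) (arr : List Int) : Prop := 2 ≤ arr.length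
instance (total : Int) (arr : List Int) : Decidable (Pre_part1_helper total arr) := by unfold Pre_part1_helper; infer_instance
def pvWitness_part1_helper : Int × List Int := (29, [2, 3, 4, 5])

def Spec_part1_helper (total : Int) (arr : List Int) (out : Bool) : Prop := out = part1_helper_alt total arr
instance (total : Int) (arr : List Int) (out : Bool) : Decidable (Spec_part1_helper total arr out) := by unfold Spec_part1_helper; infer_instance

-- ===== CLAIM (what is proved, stated in full; the proofs are below) =====
def Claim_equal_part1_helper : Prop := ∀ (total : Int) (arr : List Int), Dom_part1_helper total arr → Pre_part1_helper total arr → Spec_part1_helper total arr (part1_helper total arr)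
-- ===== LEMMAS AND PROOFS =====

-- pure level fold (A's loop without the 'last new_set' bookkeeping)
def pvLev (s : PySem.Set Int) (l : List Int) : PySem.Set Int := l.foldl pvStepA s

theorem pvPairFold (l : List Int) (c : PySem.Set Int) (o : Option (PySem.Set Int))
    (h : l ≠ []) :
    l.foldl (fun (st : PySem.Set Int × Option (PySem.Set Int)) i =>
        let ns := pvStepA st.1 i; (ns, some ns)) (c, o)
      = (pvLev c l, some (pvLev c l)) := by
  induction l generalizing c o with
  | nil => exact absurd rfl h
  | cons x xs ih =>
    by_cases hxs : xs = []
    · subst hxs; simp [pvLev]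
    · simp only [List.foldl_cons]
      rw [ih _ _ hxs]
      simp [pvLev]

theorem pvMemStepAux (L : List Int) (i b : Int) (ns : PySem.Set Int) :
    b ∈ L.foldl (fun ns v => PySem.Set.add (PySem.Set.add ns (v*i)) (v+i)) ns
      ↔ b ∈ ns ∨ ∃ a ∈ L, b = a*i ∨ b = a+i := by
  induction L generalizing ns with
  | nil => simp
  | cons v vs ih =>
    simp only [List.foldl_cons, ih, PySem.Set.mem_add]
    constructor
    · rintro (((h | h) | h) | ⟨a, ha, h⟩)
      · exact Or.inl h
      · exact Or.inr ⟨v, by simp, Or.inl h⟩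
      · exact Or.inr ⟨v, by simp, Or.inr h⟩
      · exact Or.inr ⟨a, by simp [ha], h⟩
    · rintro (h | ⟨a, ha, h⟩)
      · exact Or.inl (Or.inl (Or.inl h))
      · rcases List.mem_cons.mp ha with rfl | ha
        · rcases h with h | h
          · exact Or.inl (Or.inl (Or.inr h))
          · exact Or.inl (Or.inr h)
        · exact Or.inr ⟨a, ha, h⟩

theorem pvMemStep (s : PySem.Set Int) (i b : Int) :
    b ∈ pvStepA s i ↔ ∃ a ∈ s, b = a*i ∨ b = a+i := by
  unfold pvStepA
  rw [pvMemStepAux]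
  simp [PySem.Set.empty]

theorem pvLevGo (l : List Int) (s : PySem.Set Int) (total : Int) :
    (total ∈ pvLev s l) ↔ ∃ a ∈ s, pvGo total a l = true := by
  induction l generalizing s with
  | nil =>
    simp only [pvLev, List.foldl_nil, pvGo]
    constructor
    · intro h; exact ⟨total, h, by simp⟩
    · rintro ⟨a, ha, h⟩
      have : a = total := by simpa using h
      exact this ▸ ha
  | cons i tl ih =>
    show (total ∈ pvLev (pvStepA s i) tl) ↔ _
    rw [ih]
    constructor
    · rintro ⟨b, hb, hgo⟩
      rcases (pvMemStep s i b).mp hb with ⟨a, ha, rfl | rfl⟩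
      · exact ⟨a, ha, by simp [pvGo, hgo]⟩
      · exact ⟨a, ha, by simp [pvGo, hgo]⟩
    · rintro ⟨a, ha, hgo⟩
      rcases Bool.or_eq_true_iff.mp (by simpa [pvGo] using hgo) with h | h
      · exact ⟨a*i, (pvMemStep s i _).mpr ⟨a, ha, Or.inl rfl⟩, h⟩
      · exact ⟨a+i, (pvMemStep s i _).mpr ⟨a, ha, Or.inr rfl⟩, h⟩

-- ===== VERDICT (by name: the statement is the Claim_ definition above) =====
theorem part1_helper_spec : Claim_equal_part1_helper := by
  intro total arr _ hpre
  unfold Spec_part1_helper part1_helper part1_helper_alt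
  match arr, hpre with
  | a0 :: i :: rest, _ =>
    simp only [PySem.List.pyGet?_zero_cons, PySem.List.slice_from_one, List.tail_cons]
    rw [pvPairFold (i :: rest) _ _ (by simp)]
    simp only []
    have hmem : (PySem.Set.contains (pvLev (PySem.Set.add PySem.Set.empty a0) (i :: rest)) total = true)
        ↔ ∃ a ∈ (PySem.Set.add PySem.Set.empty a0 : PySem.Set Int), pvGo total a (i :: rest) = true := by
      rw [← pvLevGo]
      constructor
      · intro h; simpa [PySem.Set.contains] using h
      · intro h; simpa [PySem.Set.contains] using h
    have hsingle : ∀ a : Int, a ∈ (PySem.Set.add PySem.Set.empty a0 : PySem.Set Int) ↔ a = a0 := by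
      intro a; simp [PySem.Set.empty]
    by_cases hg : pvGo total a0 (i :: rest) = true
    · rw [hg]
      exact hmem.mpr ⟨a0, (hsingle a0).mpr rfl, hg⟩
    · have hfalse : PySem.Set.contains (pvLev (PySem.Set.add PySem.Set.empty a0) (i :: rest)) total = false := by
        apply Bool.eq_false_iff.mpr
        intro hc
        rcases hmem.mp hc with ⟨a, ha, hgo⟩
        rw [(hsingle a).mp ha] at hgo
        exact hg hgo
      rw [hfalse, Bool.eq_false_iff.mpr hg]
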